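-- pv_equiv track=rewrite | github.com/ShimonMalnick/glow-pytorch | train.py | calc_z_shapes
-- ===== SOURCE A (Python) =====
-- from typing import List, Tuple
--
-- def calc_z_shapes(n_channel, input_size, n_flow, n_block) -> List[Tuple]:
--     z_shapes = []
--
--     for i in range(n_block - 1):
--         input_size //= 2
--         n_channel *= 2
--
--         z_shapes.append((n_channel, input_size, input_size))
--
--     input_size //= 2
--     z_shapes.append((n_channel * 4, input_size, input_size))
--
--     return z_shapes
-- ===== SOURCE B (Python) =====
-- def calc_z_shapes(n_channel, input_size, n_flow, n_block):
--     m = max(n_block - 1, 0)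
--     shapes = [(n_channel << (i + 1), input_size >> (i + 1), input_size >> (i + 1))
--               for i in range(m)]
--     last = input_size >> (m + 1)
--     shapes.append(((n_channel << m) * 4, last, last))
--     return shapes
-- ===== Notes on version B (the rewrite author's own statement) =====
-- stated objective: simpler
-- what changed: Replaces the accumulator loop that mutates input_size and n_channel with a closed-form list comprehension computing each block's shape directly from its index (powers of two), plus one unconditionally appended final tuple.
import Mathlib
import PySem

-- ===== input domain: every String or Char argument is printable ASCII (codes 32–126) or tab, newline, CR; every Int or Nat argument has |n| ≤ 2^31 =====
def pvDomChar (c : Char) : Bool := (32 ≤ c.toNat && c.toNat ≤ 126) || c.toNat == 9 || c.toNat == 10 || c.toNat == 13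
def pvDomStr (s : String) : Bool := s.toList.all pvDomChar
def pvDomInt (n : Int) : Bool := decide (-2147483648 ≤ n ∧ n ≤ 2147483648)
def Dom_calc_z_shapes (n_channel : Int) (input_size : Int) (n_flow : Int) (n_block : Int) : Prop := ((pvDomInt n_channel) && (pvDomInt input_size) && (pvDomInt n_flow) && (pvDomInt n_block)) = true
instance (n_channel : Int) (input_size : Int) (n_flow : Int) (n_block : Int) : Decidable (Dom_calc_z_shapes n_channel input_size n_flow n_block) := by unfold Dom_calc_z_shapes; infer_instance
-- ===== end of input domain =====

-- B replaces A's accumulator loop by a closed-form per-index formula (objective: simpler); return values proved equal.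

-- ===== PORT A =====
def calc_z_shapes (n_channel : Int) (input_size : Int) (n_flow : Int) (n_block : Int) : List (Int × Int × Int) :=
  let st := (PySem.List.pyRange 0 (n_block - 1) 1).foldl
    (fun (st : Int × Int × List (Int × Int × Int)) _ =>
      let s := PySem.Int.floordiv st.2.1 2
      let c := st.1 * 2
      (c, s, st.2.2 ++ [(c, s, s)]))
    (n_channel, input_size, [])
  let s := PySem.Int.floordiv st.2.1 2
  st.2.2 ++ [(st.1 * 4, s, s)]

-- ===== PORT B =====
def calc_z_shapes_alt (n_channel : Int) (input_size : Int) (n_flow : Int) (n_block : Int) : List (Int × Int × Int) :=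
  let m := max (n_block - 1) 0
  let shapes := (PySem.List.pyRange 0 m 1).map (fun i =>
    let k : Nat := (i + 1).toNat
    (n_channel <<< k, input_size >>> k, input_size >>> k))
  let last := input_size >>> ((m + 1).toNat : Nat)
  shapes ++ [((n_channel <<< (m.toNat : Nat)) * 4, last, last)]

-- ===== PRECONDITION & SPEC =====
def Spec_calc_z_shapes (n_channel : Int) (input_size : Int) (n_flow : Int) (n_block : Int) (out : List (Int × Int × Int)) : Prop := out = calc_z_shapes_alt n_channel input_size n_flow n_block
instance (n_channel : Int) (input_size : Int) (n_flow : Int) (n_block : Int) (out : List (Int × Int × Int)) : Decidable (Spec_calc_z_shapes n_channel input_size n_flow n_block out) := by unfold Spec_calc_z_shapes; infer_instance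

-- ===== CLAIM (what is proved, stated in full; the proofs are below) =====
def Claim_equal_calc_z_shapes : Prop := ∀ (n_channel : Int) (input_size : Int) (n_flow : Int) (n_block : Int), Dom_calc_z_shapes n_channel input_size n_flow n_block → Spec_calc_z_shapes n_channel input_size n_flow n_block (calc_z_shapes n_channel input_size n_flow n_block)

-- ===== LEMMAS AND PROOFS =====

-- halving twice is dividing by the doubled power of two (divisors positive)
lemma fd_fd (s : Int) (n : Nat) :
    PySem.Int.floordiv (PySem.Int.floordiv s (2 ^ n)) 2 = PySem.Int.floordiv s (2 ^ (n + 1)) := by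
  rw [PySem.Int.floordiv_eq_ediv_of_pos (b := (2:Int) ^ n) (by positivity),
      PySem.Int.floordiv_eq_ediv_of_pos (by norm_num),
      PySem.Int.floordiv_eq_ediv_of_pos (b := (2:Int) ^ (n + 1)) (by positivity),
      Int.ediv_ediv_of_nonneg (by positivity), pow_succ]

-- Python's x >> k on ints is floor division by 2^k
lemma shift_fd (s : Int) (k : Nat) : s >>> k = PySem.Int.floordiv s (2 ^ k) := by
  rw [Int.shiftRight_eq_div_pow, PySem.Int.floordiv_eq_ediv_of_pos (by positivity)]
  push_cast; rfl

-- closed form of A's loop over range(n)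
lemma loopA (n : Nat) (c s : Int) (acc : List (Int × Int × Int)) :
    (PySem.List.pyRange 0 (n : Int) 1).foldl
      (fun (st : Int × Int × List (Int × Int × Int)) _ =>
        let s' := PySem.Int.floordiv st.2.1 2
        let c' := st.1 * 2
        (c', s', st.2.2 ++ [(c', s', s')]))
      (c, s, acc)
    = (c * 2 ^ n, PySem.Int.floordiv s (2 ^ n),
       acc ++ (PySem.List.pyRange 0 (n : Int) 1).map (fun i =>
         (c * 2 ^ (i + 1).toNat,
          PySem.Int.floordiv s (2 ^ (i + 1).toNat),
          PySem.Int.floordiv s (2 ^ (i + 1).toNat)))) := by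
  induction n with
  | zero =>
    rw [Nat.cast_zero, PySem.List.pyRange_one_eq_nil (le_refl (0:Int))]
    simp
  | succ k ih =>
    have hcast : ((k + 1 : Nat) : Int) = (k : Int) + 1 := by push_cast; ring
    rw [hcast, PySem.List.pyRange_one_succ_right (by positivity), List.foldl_append, ih,
        List.map_append]
    simp only [List.foldl_cons, List.foldl_nil, List.map_cons, List.map_nil]
    refine congrArg₂ _ ?_ (congrArg₂ _ ?_ ?_)
    · rw [pow_succ]; ring
    · exact fd_fd s k
    · have h1 : ((k : Int) + 1).toNat = k + 1 := by omega
      rw [List.append_assoc]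
      congr 1
      rw [fd_fd s k, h1, pow_succ, ← mul_assoc]

-- ===== VERDICT (by name: the statement is the Claim_ definition above) =====
theorem calc_z_shapes_spec : Claim_equal_calc_z_shapes := by
  intro c s nf nb _
  unfold Spec_calc_z_shapes calc_z_shapes calc_z_shapes_alt
  have hmax : max (nb - 1) 0 = ((nb - 1).toNat : Int) := by omega
  have hrange : nb - 1 = ((nb - 1).toNat : Int) ∨ nb - 1 ≤ 0 := by omega
  set n : Nat := (nb - 1).toNat with hn
  have hr : PySem.List.pyRange 0 (nb - 1) 1 = PySem.List.pyRange 0 (n : Int) 1 := by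
    rcases hrange with h | h
    · rw [← h]
    · rw [PySem.List.pyRange_one_eq_nil h,
          PySem.List.pyRange_one_eq_nil (by omega : ((n : Int)) ≤ 0)]
  rw [hr, loopA n c s []]
  simp only [hmax, List.nil_append, Int.shiftLeft_eq, shift_fd]
  have h2 : (((n : Int)) + 1).toNat = n + 1 := by omega
  have h3 : ((n : Int)).toNat = n := by omega
  rw [h2, h3, fd_fd s n]
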